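-- pv_equiv track=rewrite | github.com/SSAFY-6-1-3/Algorithm | 0907/p_68645_somi.py | solution
-- ===== SOURCE A (Python) =====
-- def solution(n):
--
--     triangle = []
--     for i in range(1, n + 1):  # 0으로 채워진 삼각형 모양 2차원 리스트 생성
--         sub_list = [0] * i
--         triangle.append(sub_list)
--
--     direction = [[1, 0], [0, 1], [-1, -1]]  # 반시계 방향으로 움직이기
--
--     length = n  # 한 방향으로 이동할 길이
--     di = 0  # direction 인덱스
--     r, c = -1, 0  # 숫자 넣을 위치
--     number = 0  # 채울 숫자
--
--     while length > 0:  # 이동할 길이가 0보다 클 때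
--
--         for _ in range(length):  # 한 방향으로 for문을 돌면서 숫자 채워넣기
--             number += 1  # 채울 숫자를 1씩 증가
--             r += direction[di][0]  # 숫자 넣을 인덱스
--             c += direction[di][1]
--             triangle[r][c] = number  # 숫자 저장하기
--
--         length -= 1  # 이동할 길이가 1씩 줄어듬
--         di = (di + 1) % 3  # 그 다음 이동할 방향
--
--     answer = []
--     for i in triangle: # 2중 리스트 풀어주기
--         answer.extend(i)
--     return answer
-- ===== SOURCE B (Python) =====
-- def solution(n):
--     # ring-by-ring fill: closed-form cell lists per ring, no direction state / walking
--     triangle = [[0] * i for i in range(1, n + 1)]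
--     k = 0
--     m, s = 0, n          # m = ring index, s = side length of the remaining inner triangle
--     while s > 0:
--         br, bc = 2 * m, m    # top cell of ring m inside the big triangle
--         cells = [(i, 0) for i in range(s)] \
--               + [(s - 1, j) for j in range(1, s)] \
--               + [(s - 1 - t, s - 1 - t) for t in range(1, s - 1)]
--         for (r, c) in cells:
--             k += 1
--             triangle[br + r][bc + c] = k
--         m += 1
--         s -= 3
--     return [x for row in triangle for x in row]
-- ===== Notes on version B (the rewrite author's own statement) =====
-- stated objective: alternative
-- what changed: Replaces the stateful snail walk (direction list, (r,c) cursor, turn every segment) by a ring-by-ring fill whose cell coordinates per ring come from three closed-form comprehensions anchored at the ring's top cell (2m, m).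
import Mathlib
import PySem

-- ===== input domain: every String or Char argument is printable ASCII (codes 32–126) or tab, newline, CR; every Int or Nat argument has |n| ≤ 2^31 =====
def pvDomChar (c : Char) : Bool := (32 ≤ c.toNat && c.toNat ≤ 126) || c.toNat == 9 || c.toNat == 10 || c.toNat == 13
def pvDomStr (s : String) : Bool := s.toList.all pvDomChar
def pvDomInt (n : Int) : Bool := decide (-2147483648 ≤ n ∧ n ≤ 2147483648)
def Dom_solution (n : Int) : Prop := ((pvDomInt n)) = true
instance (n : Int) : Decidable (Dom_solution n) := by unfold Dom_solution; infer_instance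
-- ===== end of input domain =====

-- B replaces A's stateful snail walk by a ring-by-ring fill with closed-form cell lists (objective: alternative algorithm of the same cost).

-- ===== PORT A =====

-- Python 'lst[i] = v': negative index wraps; IndexError is unreachable in these
-- programs (all writes are in range), out-of-range leaves the list unchanged.
def pySet (l : List Int) (i v : Int) : List Int :=
  let j := if i < 0 then i + l.length else i
  if 0 ≤ j ∧ j < l.length then l.set j.toNat v else l

-- Python 'triangle[r][c] = v' on a list of lists, same convention.
def pySet2 (t : List (List Int)) (r c v : Int) : List (List Int) :=
  let j := if r < 0 then r + t.length else r
  if 0 ≤ j ∧ j < t.length then t.set j.toNat (pySet (t.getD j.toNat []) c v) else t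

def dirsA : List (Int × Int) := [(1, 0), (0, 1), (-1, -1)]

-- inner 'for _ in range(length)' of A
def segA (dr dc : Int) : Nat → List (List Int) × Int × Int × Int → List (List Int) × Int × Int × Int
  | 0, st => st
  | Nat.succ k, (tri, r, c, num) =>
      let num := num + 1
      let r := r + dr
      let c := c + dc
      segA dr dc k (pySet2 tri r c num, r, c, num)

-- outer 'while length > 0' of A; 'direction[di]' read with Python indexing (di is always 0,1,2)
def loopA (tri : List (List Int)) (len di r c num : Int) : List (List Int) :=
  if h : 0 < len then
    let d := (PySem.List.pyGet? dirsA di).getD (0, 0)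
    let st := segA d.1 d.2 len.toNat (tri, r, c, num)
    loopA st.1 (len - 1) (PySem.Int.mod (di + 1) 3) st.2.1 st.2.2.1 st.2.2.2
  else tri
termination_by len.toNat
decreasing_by omega

def solution (n : Int) : List Int :=
  let tri := (PySem.List.pyRange 1 (n + 1) 1).map (fun i => List.replicate i.toNat 0)
  (loopA tri n 0 (-1) 0 0).foldl (fun acc row => acc ++ row) []

-- ===== PORT B =====

-- the three comprehensions of one ring, concatenated
def ringCells (s : Int) : List (Int × Int) :=
  (PySem.List.pyRange 0 s 1).map (fun i => (i, (0 : Int)))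
  ++ (PySem.List.pyRange 1 s 1).map (fun j => (s - 1, j))
  ++ (PySem.List.pyRange 1 (s - 1) 1).map (fun t => (s - 1 - t, s - 1 - t))

-- body of 'for (r, c) in cells: k += 1; triangle[br+r][bc+c] = k'
def writeStep (st : List (List Int) × Int) (rc : Int × Int) : List (List Int) × Int :=
  let k := st.2 + 1
  (pySet2 st.1 rc.1 rc.2 k, k)

-- 'while s > 0' of B
def loopB (tri : List (List Int)) (m s k : Int) : List (List Int) :=
  if 0 < s then
    let st := (ringCells s).foldl (fun st rc => writeStep st (2 * m + rc.1, m + rc.2)) (tri, k)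
    loopB st.1 (m + 1) (s - 3) st.2
  else tri
termination_by s.toNat
decreasing_by omega

def solution_alt (n : Int) : List Int :=
  let tri := (PySem.List.pyRange 1 (n + 1) 1).map (fun i => List.replicate i.toNat 0)
  (loopB tri 0 n 0).flatMap (fun row => row)

-- ===== PRECONDITION & SPEC =====
def Spec_solution (n : Int) (out : List Int) : Prop := out = solution_alt n
instance (n : Int) (out : List Int) : Decidable (Spec_solution n out) := by unfold Spec_solution; infer_instance

-- ===== CLAIM (what is proved, stated in full; the proofs are below) =====
def Claim_equal_solution : Prop := ∀ (n : Int), Dom_solution n → Spec_solution n (solution n)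

-- ===== LEMMAS AND PROOFS =====

-- A's inner segment loop is a writeStep-fold over the list of cells it visits.
theorem segA_eq (dr dc : Int) (L : Nat) :
    ∀ (tri : List (List Int)) (r c k : Int),
    segA dr dc L (tri, r, c, k) =
      (let P := ((List.range L).map
          (fun i : Nat => (r + dr * ((i : Int) + 1), c + dc * ((i : Int) + 1)))).foldl
          writeStep (tri, k)
       (P.1, r + dr * L, c + dc * L, P.2)) := by
  induction L with
  | zero => intro tri r c k; simp [segA]
  | succ L ih =>
      intro tri r c k
      rw [List.range_succ_eq_map]
      simp only [List.map_cons, List.map_map, List.foldl_cons, segA]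
      rw [ih]
      have key : ∀ (l1 l2 : List (Int × Int)) (t1 t2 : List (List Int) × Int) (a1 a2 b1 b2 : Int),
          l1 = l2 → t1 = t2 → a1 = a2 → b1 = b2 →
          ((List.foldl writeStep t1 l1).1, a1, b1, (List.foldl writeStep t1 l1).2)
            = ((List.foldl writeStep t2 l2).1, a2, b2, (List.foldl writeStep t2 l2).2) := by
        intro l1 l2 t1 t2 a1 a2 b1 b2 h1 h2 h3 h4; subst h1; subst h2; subst h3; subst h4; rfl
      apply key
      · apply List.map_congr_left; intro i _
        simp only [Function.comp, Prod.ext_iff]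
        constructor <;> push_cast <;> ring
      · norm_num [writeStep]
      · push_cast; ring
      · push_cast; ring

-- One ring of A (up to three outer iterations, directions 0,1,2) equals one ring of B.
theorem foldl_write_map (h' : Int × Int → Int × Int) (f : Nat → Int × Int)
    (l : List Nat) (init : List (List Int) × Int) :
    List.foldl (fun st rc => writeStep st (h' rc)) init (l.map f)
      = List.foldl writeStep init (l.map (fun i => h' (f i))) := by
  rw [List.foldl_map, List.foldl_map]

theorem ring_eq : ∀ (N : Nat) (s : Int), s.toNat ≤ N →
    ∀ (m k : Int) (tri : List (List Int)),
    loopA tri s 0 (2 * m - 1) m k = loopB tri m s k := by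
  intro N
  induction N with
  | zero =>
    intro s hs m k tri
    have h : ¬ (0:Int) < s := by omega
    rw [loopA, loopB]
    simp [h]
  | succ N ih =>
    intro s hs m k tri
    by_cases hpos : (0:Int) < s
    · by_cases h1 : s = 1
      · subst h1
        rw [loopA, loopB]
        norm_num [segA, ringCells, writeStep, PySem.List.pyRange_one, List.range_one, dirsA]
        rw [loopA]
        norm_num
        rw [loopB]
        norm_num
      · by_cases h2 : s = 2
        · subst h2
          rw [loopA, loopB]
          norm_num [segA, ringCells, writeStep, PySem.List.pyRange_one, dirsA,
            List.range_succ, List.range_one, show Int.toNat 2 = 2 from rfl]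
          rw [loopA]
          norm_num [segA, writeStep, dirsA]
          rw [loopA]
          norm_num
          rw [loopB]
          norm_num
        · have h3 : 3 ≤ s := by omega
          have hc : ((s.toNat:Int)) = s := by omega
          have hc1 : (((s-1).toNat:Int)) = s-1 := by omega
          have hc2 : (((s-1-1).toNat:Int)) = s-2 := by omega
          have hmax : max s 0 = s := by omega
          have hf2 : Int.fmod 2 3 = 2 := by decide
          have hn1 : ((s.toNat - 1 : Nat) : Int) = s - 1 := by omega
          have hn2 : ((s.toNat - 1 - 1 : Nat) : Int) = s - 2 := by omega
          rw [loopA, dif_pos (show (0:Int) < s by omega)]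
          norm_num [dirsA, segA_eq]
          rw [loopA, dif_pos (show (0:Int) < s - 1 by omega)]
          norm_num [dirsA, segA_eq, PySem.Int.mod]
          rw [loopA, dif_pos (show (0:Int) < s - 1 - 1 by omega)]
          norm_num [dirsA, segA_eq, PySem.Int.mod, hmax, hf2, hn1, hn2,
            show Int.toNat 2 = 2 from rfl]
          rw [loopB, if_pos (show (0:Int) < s by omega)]
          rw [← List.foldl_map]
          norm_num [ringCells, PySem.List.pyRange_one, List.foldl_append, hmax, hc1, hn1, hn2,
            show ((s-1) - 1).toNat = s.toNat - 1 - 1 from by omega,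
            show (s - 1).toNat = s.toNat - 1 from by omega]
          simp only [foldl_write_map]
          rw [show s-1-1-1 = s-3 by ring, show 2*m-1+2 = 2*(m+1)-1 by ring,
              show m + (s-1) + (2-s) = m+1 by ring]
          have key : ∀ (QA QB : List (List Int) × Int), QA = QB →
              loopA QA.1 (s-3) 0 (2*(m+1)-1) (m+1) QA.2 = loopB QB.1 (m+1) (s-3) QB.2 := by
            intro QA QB h; subst h; exact ih (s-3) (by omega) (m+1) QA.2 QA.1
          apply key
          congr 1
          · congr 1
            · congr 1
              apply List.map_congr_left; intro i _
              simp only [Function.comp, Prod.ext_iff]; constructor <;> push_cast <;> ring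
            · apply List.map_congr_left; intro i _
              simp only [Function.comp, Prod.ext_iff]; constructor <;> push_cast <;> ring
          · apply List.map_congr_left; intro i _
            simp only [Function.comp, Prod.ext_iff]; constructor <;> push_cast <;> ring
    · rw [loopA, loopB]
      simp [hpos]

-- ===== VERDICT (by name: the statement is the Claim_ definition above) =====
theorem solution_spec : Claim_equal_solution := by
  unfold Claim_equal_solution
  intro n _
  unfold Spec_solution solution solution_alt
  have h := ring_eq n.toNat n le_rfl 0 0
      ((PySem.List.pyRange 1 (n + 1) 1).map (fun i => List.replicate i.toNat 0))
  simp only []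
  rw [show (2 * (0:Int) - 1) = -1 by ring] at h
  rw [h, PySem.List.foldl_append_eq_flatten, List.nil_append, List.flatMap_id']
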